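-- pv_equiv track=rewrite | github.com/jvivian/rnaseq-lib3 | src/rnaseq_lib3/math/__init__.py | mutually_exclusive_set_counts
-- ===== SOURCE A (Python) =====
-- from itertools import combinations
-- from typing import Union, List, Tuple, Set, Dict
--
-- def mutually_exclusive_set_counts(
--         sets: Dict[str, Set[str]],
--         groups: List[str] = None):
--     """
--     Given a dictionary of sets, computes the mutually exclusive set intersection counts
--
--     Args:
--         sets: Dictionary of sets
--         groups: Optional set of keys to subset from set dictionary
--
--     Returns:
--         Memberships and their associated counts
--     """
--     # Collect master set
--     groups = sets.keys() if groups is None else groups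
--     master = set()
--     for g in groups:
--         for s in sets[g]:
--             master.add(s)
--
--     combs = []
--     counts = []
--     # For decreasing set sizes, identify if outlier belongs to group
--     for i in range(len(groups), 0, -1):
--         for combination in combinations(groups, i):
--             count = 0
--             combs.append(combination)
--             inter = set.intersection(*[sets[x] for x in combination])
--
--             # Iterate over master and pop items if they belong to group
--             for item in list(master):
--                 if item in inter:
--                     count += 1
--                     master.remove(item)
--
--             counts.append(count)
--     return combs, counts
-- ===== SOURCE B (Python) =====
-- from itertools import combinations
-- from collections import Counter
--
--
-- def mutually_exclusive_set_counts(
--         sets,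
--         groups=None):
--     """Tally each item's exact membership once, then read counts off the tally."""
--     groups = list(sets.keys()) if groups is None else list(groups)
--     master = {s for g in groups for s in sets[g]}
--     tally = Counter(tuple(g for g in groups if s in sets[g]) for s in master)
--     combs = []
--     counts = []
--     for i in range(len(groups), 0, -1):
--         for combination in combinations(groups, i):
--             combs.append(combination)
--             counts.append(tally.get(combination, 0))
--     return combs, counts
-- ===== Notes on version B (the rewrite author's own statement) =====
-- stated objective: faster
-- what changed: Instead of intersecting every combination's sets and rescanning/shrinking the master set inside the 2^n combination loop, B computes each item's exact membership tuple in one pass, tallies them in a Counter, and each combination's count becomes a single dict lookup.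
import Mathlib
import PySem

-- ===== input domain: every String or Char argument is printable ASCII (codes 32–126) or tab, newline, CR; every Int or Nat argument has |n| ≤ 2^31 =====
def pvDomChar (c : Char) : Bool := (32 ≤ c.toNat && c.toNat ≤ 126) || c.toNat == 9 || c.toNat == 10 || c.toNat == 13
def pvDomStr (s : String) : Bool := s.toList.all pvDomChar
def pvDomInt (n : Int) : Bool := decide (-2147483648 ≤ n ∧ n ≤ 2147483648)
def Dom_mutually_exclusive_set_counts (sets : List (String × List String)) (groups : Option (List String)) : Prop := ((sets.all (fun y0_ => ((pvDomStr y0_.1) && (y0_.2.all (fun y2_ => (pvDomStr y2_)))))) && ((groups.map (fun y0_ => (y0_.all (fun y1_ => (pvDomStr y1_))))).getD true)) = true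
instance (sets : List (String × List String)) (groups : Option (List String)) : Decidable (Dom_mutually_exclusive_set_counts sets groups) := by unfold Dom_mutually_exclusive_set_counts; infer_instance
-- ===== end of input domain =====

-- B tallies each item's exact membership combination once and reads every count
-- off that tally, instead of intersecting sets and rescanning the shrinking
-- master set for each of the 2^n combinations (objective: faster).

-- ===== PORT A =====
-- `sets[g]` is ported as `getD g []`; Pre_ excludes the inputs where Python
-- would raise KeyError, so the default is never reached on admitted inputs.
-- `master.remove(item)` is ported as `Set.discard` (value-equal here: `item`
-- is drawn from a copy of `master` and each element is removed at most once).
def mutually_exclusive_set_counts (sets : List (String × List String)) (groups : Option (List String)) : List (List String) × List Int :=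
  let d := PySem.Dict.ofList sets
  let gs : List String :=
    match groups with
    | none => d.keys
    | some gs => gs
  let master : PySem.Set String :=
    gs.foldl (fun master g => (PySem.Dict.getD d g []).foldl (fun master s => PySem.Set.add master s) master) PySem.Set.empty
  let st :=
    (PySem.List.pyRange (gs.length : Int) 0 (-1)).foldl (fun st i =>
      (PySem.List.combinations gs i.toNat).foldl (fun st combination =>
        let inter : PySem.Set String :=
          match combination with
          | [] => PySem.Set.empty   -- unreachable: i ≥ 1 (Python would raise TypeError)
          | x :: rest => rest.foldl (fun acc y => PySem.Set.inter acc (PySem.Dict.getD d y [])) (PySem.Set.ofList (PySem.Dict.getD d x []))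
        let cm :=
          st.2.2.foldl (fun cm item =>
            if PySem.Set.contains inter item then (cm.1 + 1, PySem.Set.discard cm.2 item) else cm)
            ((0 : Int), st.2.2)
        (st.1 ++ [combination], st.2.1 ++ [cm.1], cm.2)) st)
      (([] : List (List String)), ([] : List Int), master)
  (st.1, st.2.1)

-- ===== PORT B =====
def mutually_exclusive_set_counts_alt (sets : List (String × List String)) (groups : Option (List String)) : List (List String) × List Int :=
  let d := PySem.Dict.ofList sets
  let gs : List String :=
    match groups with
    | none => d.keys
    | some gs => gs
  let master : PySem.Set String := PySem.Set.ofList (gs.flatMap (fun g => PySem.Dict.getD d g []))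
  let tally : PySem.Dict (List String) Int :=
    PySem.Dict.counter (master.map (fun s => gs.filter (fun g => (PySem.Dict.getD d g []).contains s)))
  (PySem.List.pyRange (gs.length : Int) 0 (-1)).foldl (fun st i =>
    (PySem.List.combinations gs i.toNat).foldl (fun st combination =>
      (st.1 ++ [combination], st.2 ++ [PySem.Dict.getD tally combination 0])) st)
    (([] : List (List String)), ([] : List Int))

-- ===== PRECONDITION & SPEC =====
-- Pre_ excludes exactly the inputs on which Python A raises KeyError: an
-- explicit `groups` entry that is not a key of `sets`.
def Pre_mutually_exclusive_set_counts (sets : List (String × List String)) (groups : Option (List String)) : Prop :=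
  ((groups.getD []).all (fun g => (sets.map Prod.fst).contains g)) = true
instance (sets : List (String × List String)) (groups : Option (List String)) : Decidable (Pre_mutually_exclusive_set_counts sets groups) := by unfold Pre_mutually_exclusive_set_counts; infer_instance
def pvWitness_mutually_exclusive_set_counts : (List (String × List String)) × Option (List String) :=
  ([("a", ["x", "y"]), ("b", ["y"])], some ["a", "b"])

def Spec_mutually_exclusive_set_counts (sets : List (String × List String)) (groups : Option (List String)) (out : List (List String) × List Int) : Prop := out = mutually_exclusive_set_counts_alt sets groups
instance (sets : List (String × List String)) (groups : Option (List String)) (out : List (List String) × List Int) : Decidable (Spec_mutually_exclusive_set_counts sets groups out) := by unfold Spec_mutually_exclusive_set_counts; infer_instance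

-- ===== CLAIM (what is proved, stated in full; the proofs are below) =====
def Claim_equal_mutually_exclusive_set_counts : Prop := ∀ (sets : List (String × List String)) (groups : Option (List String)), Dom_mutually_exclusive_set_counts sets groups → Pre_mutually_exclusive_set_counts sets groups → Spec_mutually_exclusive_set_counts sets groups (mutually_exclusive_set_counts sets groups)

-- ===== LEMMAS AND PROOFS =====

/-- Decreasing list `[n, n-1, …, 1]`: the values of Python's `range(n, 0, -1)`. -/
def pvDown : Nat → List Nat
  | 0 => []
  | n + 1 => (n + 1) :: pvDown n

/-- `item ∈ inter(combination)`: every group of the combination contains `s`. -/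
def pvPm (d : PySem.Dict String (List String)) (c : List String) (s : String) : Bool :=
  c.all (fun g => (PySem.Dict.getD d g []).contains s)

/-- The exact membership combination of item `s`. -/
def pvMf (d : PySem.Dict String (List String)) (gs : List String) (s : String) : List String :=
  gs.filter (fun g => (PySem.Dict.getD d g []).contains s)

lemma pvDown_map (n : Nat) :
    (List.range n).map (fun k : Nat => (n : Int) - (k : Int)) = (pvDown n).map (fun j : Nat => (j : Int)) := by
  induction n with
  | zero => simp [pvDown]
  | succ n ih =>
    rw [List.range_succ_eq_map, List.map_cons, List.map_map, pvDown, List.map_cons]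
    congr 1
    rw [← ih]
    apply List.map_congr_left
    intro k hk
    simp [Function.comp, Nat.succ_eq_add_one]

lemma pvRange_eq (n : Nat) :
    PySem.List.pyRange (n : Int) 0 (-1) = (pvDown n).map (fun j : Nat => (j : Int)) := by
  rw [← pvDown_map]
  unfold PySem.List.pyRange
  cases n with
  | zero => simp
  | succ n =>
    norm_num
    intro a _
    ring

lemma pv_mem_pvDown {n j : Nat} (h : j ∈ pvDown n) : 1 ≤ j ∧ j ≤ n := by
  induction n with
  | zero => simp [pvDown] at h
  | succ n ih =>
    rcases List.mem_cons.mp h with rfl | h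
    · omega
    · have := ih h; omega

lemma pv_pm_mf (d : PySem.Dict String (List String)) (gs : List String) (x : String) :
    pvPm d (pvMf d gs x) x = true := by
  simp only [pvPm, pvMf, List.all_eq_true]
  intro g hg
  exact (List.mem_filter.mp hg).2

lemma pv_sat_sublist {d : PySem.Dict String (List String)} {gs : List String} {x : String}
    {C : List String} (hC : C.Sublist gs) (h : pvPm d C x = true) :
    C.Sublist (pvMf d gs x) := by
  have hself : C.filter (fun g => (PySem.Dict.getD d g []).contains x) = C :=
    List.filter_eq_self.mpr (by simpa [pvPm, List.all_eq_true] using h)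
  have := hC.filter (fun g => (PySem.Dict.getD d g []).contains x)
  rw [hself] at this
  exact this

lemma pv_inter_contains (d : PySem.Dict String (List String)) (y : String) (rest : List String) (s : String) :
    PySem.Set.contains (rest.foldl (fun acc g => PySem.Set.inter acc (PySem.Dict.getD d g [])) (PySem.Set.ofList (PySem.Dict.getD d y []))) s
      = pvPm d (y :: rest) s := by
  have key : ∀ (rest : List String) (acc : PySem.Set String),
      s ∈ rest.foldl (fun acc g => PySem.Set.inter acc (PySem.Dict.getD d g [])) acc
        ↔ s ∈ acc ∧ ∀ g ∈ rest, (PySem.Dict.getD d g []).contains s = true := by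
    intro rest
    induction rest with
    | nil => simp
    | cons g rest ih =>
      intro acc
      simp only [List.foldl_cons, ih, PySem.Set.mem_inter, List.mem_cons]
      constructor
      · rintro ⟨⟨h1, h2⟩, h3⟩
        refine ⟨h1, ?_⟩
        rintro g' (rfl | hg')
        · exact List.contains_iff_mem.mpr h2
        · exact h3 g' hg'
      · rintro ⟨h1, h2⟩
        exact ⟨⟨h1, List.contains_iff_mem.mp (h2 g (Or.inl rfl))⟩, fun g' hg' => h2 g' (Or.inr hg')⟩
  rw [Bool.eq_iff_iff, PySem.Set.contains_iff, key]
  simp [pvPm, PySem.Set.mem_ofList, List.all_eq_true]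

lemma pv_inner (p : String → Bool) (L : List String) (c0 : Int) (m : PySem.Set String) :
    L.foldl (fun cm item => if p item then (cm.1 + 1, PySem.Set.discard cm.2 item) else cm) ((c0, m) : Int × PySem.Set String)
      = (c0 + (L.countP p : Int), (L.filter p).foldl PySem.Set.discard m) := by
  rw [PySem.List.foldl_congr_mem L _
    (fun cm item => ((if p item then cm.1 + 1 else cm.1), (if p item then PySem.Set.discard cm.2 item else cm.2))) _
    (by intro acc x _; by_cases h : p x <;> simp [h])]
  rw [PySem.List.foldl_prod_mk (f := fun a item => if p item then a + 1 else a)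
      (g := fun b item => if p item then PySem.Set.discard b item else b)]
  rw [PySem.List.foldl_if_add_one, PySem.List.foldl_if_eq_foldl_filter]

lemma pv_foldl_discard (K : List String) (m : List String) :
    K.foldl PySem.Set.discard m = m.filter (fun x => !K.contains x) := by
  induction K generalizing m with
  | nil => simp
  | cons k K ih =>
    simp only [List.foldl_cons, ih]
    have hd : PySem.Set.discard m k = m.filter (fun x => x != k) := rfl
    rw [hd, List.filter_filter]
    apply List.filter_congr
    intro x hx
    simp [bne, Bool.and_comm]
    by_cases h : x = k <;> simp [h]

lemma pv_mainA (d : PySem.Dict String (List String)) (gs : List String)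
    (E : List (List String)) (m : List String) (ct : List Int)
    (hfind : ∀ x ∈ m, E.find? (fun C => pvPm d C x) = some (pvMf d gs x))
    (hcount : ∀ x ∈ m, E.count (pvMf d gs x) = 1) :
    E.foldl (fun st c => (st.1 ++ [((st.2.countP (pvPm d c) : Nat) : Int)], st.2.filter (fun x => !pvPm d c x))) ((ct, m) : List Int × List String)
      = (ct ++ E.map (fun C => ((m.countP (fun x => pvMf d gs x == C) : Nat) : Int)), ([] : List String)) := by
  induction E generalizing m ct with
  | nil =>
    cases m with
    | nil => simp
    | cons x xs => exact absurd (hfind x (by simp)) (by simp)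
  | cons C E' ih =>
    have hpm : ∀ x ∈ m, pvPm d C x = (pvMf d gs x == C) := by
      intro x hx
      by_cases h : pvPm d C x = true
      · have hf := hfind x hx
        rw [List.find?_cons, h] at hf
        have : C = pvMf d gs x := by simpa using hf
        simp [h, ← this]
      · rw [Bool.not_eq_true] at h
        have h2 : pvMf d gs x ≠ C := by
          intro hEq
          rw [← hEq] at h
          rw [pv_pm_mf d gs x] at h
          simp at h
        rw [h]
        symm
        exact beq_eq_false_iff_ne.mpr h2
    have hcntC : m.countP (pvPm d C) = m.countP (fun x => pvMf d gs x == C) :=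
      List.countP_congr (by intro x hx; rw [hpm x hx])
    have hmfilter : m.filter (fun x => !pvPm d C x) = m.filter (fun x => !(pvMf d gs x == C)) :=
      List.filter_congr (by intro x hx; rw [hpm x hx])
    simp only [List.foldl_cons]
    rw [hmfilter, hcntC]
    have hsub : ∀ x ∈ m.filter (fun x => !(pvMf d gs x == C)), x ∈ m ∧ pvMf d gs x ≠ C := by
      intro x hx
      have := List.mem_filter.mp hx
      exact ⟨this.1, by simpa using this.2⟩
    have hfind' : ∀ x ∈ m.filter (fun x => !(pvMf d gs x == C)),
        E'.find? (fun C' => pvPm d C' x) = some (pvMf d gs x) := by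
      intro x hx
      obtain ⟨hxm, hne⟩ := hsub x hx
      have hf := hfind x hxm
      rw [List.find?_cons] at hf
      have hC : pvPm d C x = false := by rw [hpm x hxm]; exact beq_eq_false_iff_ne.mpr hne
      rwa [hC] at hf
    have hcount' : ∀ x ∈ m.filter (fun x => !(pvMf d gs x == C)),
        E'.count (pvMf d gs x) = 1 := by
      intro x hx
      obtain ⟨hxm, hne⟩ := hsub x hx
      have hc := hcount x hxm
      rw [List.count_cons] at hc
      have : (C == pvMf d gs x) = false := beq_eq_false_iff_ne.mpr (fun h => hne h.symm)
      rw [this] at hc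
      simpa using hc
    rw [ih _ _ hfind' hcount']
    have hmap : E'.map (fun C' => (((m.filter (fun x => !(pvMf d gs x == C))).countP (fun x => pvMf d gs x == C') : Nat) : Int))
        = E'.map (fun C' => ((m.countP (fun x => pvMf d gs x == C') : Nat) : Int)) := by
      apply List.map_congr_left
      intro C' hC'
      congr 1
      rw [List.countP_filter]
      apply List.countP_congr
      intro x hx
      constructor
      · intro h
        have := (by simpa using h : pvMf d gs x = C' ∧ ¬pvMf d gs x = C)
        simpa using this.1
      · intro h
        have hne : C ≠ C' := by
          intro hCC
          have hc := hcount x hx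
          rw [List.count_cons] at hc
          have h1 : 0 < E'.count C' := List.count_pos_iff.mpr hC'
          have hval : pvMf d gs x = C' := by simpa using h
          rw [hval, hCC] at hc
          simp at hc
          omega
        have hval : pvMf d gs x = C' := by simpa using h
        simp [hval]
        exact fun hc => hne hc.symm
    rw [hmap]
    simp [List.map_cons]

lemma pv_count_filter_comb (p : String → Bool) (gs : List String) :
    (PySem.List.combinations gs (gs.filter p).length).count (gs.filter p) = 1 := by
  induction gs with
  | nil => simp [PySem.List.combinations_zero]
  | cons a gs ih =>
    by_cases hp : p a
    · rw [List.filter_cons_of_pos hp, List.length_cons,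
        PySem.List.combinations_cons_succ, List.count_append]
      have h1 : ((PySem.List.combinations gs (gs.filter p).length).map (fun c => a :: c)).count (a :: gs.filter p)
          = (PySem.List.combinations gs (gs.filter p).length).count (gs.filter p) :=
        List.count_map_of_injective _ _ (fun u v h => by simpa using h) _
      have h2 : (PySem.List.combinations gs ((gs.filter p).length + 1)).count (a :: gs.filter p) = 0 := by
        rw [List.count_eq_zero]
        intro hmem
        have h3 := PySem.List.sublist_of_mem_combinations hmem
        have h4 : (a :: gs.filter p).filter p = a :: gs.filter p := by
          apply List.filter_eq_self.mpr
          intro b hb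
          rcases List.mem_cons.mp hb with rfl | hb
          · exact hp
          · exact (List.mem_filter.mp hb).2
        have h5 : (a :: gs.filter p).Sublist (gs.filter p) := by
          have := h3.filter p
          rwa [h4] at this
        have := h5.length_le
        simp at this
      rw [h1, h2, ih]
    · rw [List.filter_cons_of_neg hp]
      cases hlen : (gs.filter p).length with
      | zero =>
        rw [List.length_eq_zero_iff] at hlen
        rw [hlen, PySem.List.combinations_zero]
        simp
      | succ r =>
        rw [PySem.List.combinations_cons_succ, List.count_append]
        have h1 : ((PySem.List.combinations gs r).map (fun c => a :: c)).count (gs.filter p) = 0 := by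
          rw [List.count_eq_zero]
          intro hmem
          obtain ⟨c, _, hc⟩ := List.mem_map.mp hmem
          have ha : a ∈ gs.filter p := by rw [← hc]; exact List.mem_cons_self
          exact hp (List.mem_filter.mp ha).2
        rw [h1, ← hlen, ih]

lemma pv_count_level (d : PySem.Dict String (List String)) (gs : List String) (x : String) (r : Nat) :
    (PySem.List.combinations gs r).count (pvMf d gs x) = if r = (pvMf d gs x).length then 1 else 0 := by
  split
  · next h => rw [h]; exact pv_count_filter_comb _ gs
  · next h =>
    rw [List.count_eq_zero]
    intro hmem
    exact h ((PySem.List.mem_combinations_iff gs r _).mp hmem).2.symm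

lemma pv_find (d : PySem.Dict String (List String)) (gs : List String) (x : String)
    (hne : pvMf d gs x ≠ []) (n : Nat) (hlen : (pvMf d gs x).length ≤ n) :
    ((pvDown n).flatMap (fun j => PySem.List.combinations gs j)).find? (fun C => pvPm d C x)
      = some (pvMf d gs x) := by
  induction n with
  | zero =>
    rw [Nat.le_zero, List.length_eq_zero_iff] at hlen
    exact absurd hlen hne
  | succ n ih =>
    rw [show pvDown (n+1) = (n+1) :: pvDown n from rfl, List.flatMap_cons, List.find?_append]
    by_cases h : (pvMf d gs x).length = n + 1
    · have hmem : pvMf d gs x ∈ PySem.List.combinations gs (n+1) :=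
        (PySem.List.mem_combinations_iff gs (n+1) _).mpr ⟨List.filter_sublist, h⟩
      have hsome : ((PySem.List.combinations gs (n+1)).find? (fun C => pvPm d C x)).isSome =
          true :=
        List.find?_isSome.mpr ⟨_, hmem, pv_pm_mf d gs x⟩
      obtain ⟨c, hc⟩ := Option.isSome_iff_exists.mp hsome
      have hcmem := List.mem_of_find?_eq_some hc
      have hcp := List.find?_some hc
      obtain ⟨hcsub, hclen⟩ := (PySem.List.mem_combinations_iff gs (n+1) c).mp hcmem
      have hceq : c = pvMf d gs x := (pv_sat_sublist hcsub hcp).eq_of_length (by rw [hclen, h])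
      rw [hc, hceq]
      rfl
    · have hnone : (PySem.List.combinations gs (n+1)).find? (fun C => pvPm d C x) = none := by
        rw [List.find?_eq_none]
        intro C hC hsat
        obtain ⟨hCsub, hClen⟩ := (PySem.List.mem_combinations_iff gs (n+1) C).mp hC
        have := (pv_sat_sublist hCsub hsat).length_le
        omega
      rw [hnone, Option.none_or]
      exact ih (by omega)

lemma pv_countE_zero (d : PySem.Dict String (List String)) (gs : List String) (x : String)
    (n : Nat) (h : n < (pvMf d gs x).length) :
    ((pvDown n).flatMap (fun j => PySem.List.combinations gs j)).count (pvMf d gs x) = 0 := by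
  induction n with
  | zero => simp [pvDown]
  | succ n ih =>
    rw [show pvDown (n+1) = (n+1) :: pvDown n from rfl, List.flatMap_cons, List.count_append,
      pv_count_level, if_neg (by omega), ih (by omega)]

lemma pv_countE (d : PySem.Dict String (List String)) (gs : List String) (x : String)
    (n : Nat) (h1 : 1 ≤ (pvMf d gs x).length) (h2 : (pvMf d gs x).length ≤ n) :
    ((pvDown n).flatMap (fun j => PySem.List.combinations gs j)).count (pvMf d gs x) = 1 := by
  induction n with
  | zero => omega
  | succ n ih =>
    rw [show pvDown (n+1) = (n+1) :: pvDown n from rfl, List.flatMap_cons, List.count_append,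
      pv_count_level]
    by_cases h : (pvMf d gs x).length = n + 1
    · rw [if_pos h.symm, pv_countE_zero d gs x n (by omega)]
    · rw [if_neg (fun hh => h hh.symm), ih (by omega)]

lemma pv_mem_master {d : PySem.Dict String (List String)} {gs : List String} {x : String}
    (hx : x ∈ PySem.Set.ofList (gs.flatMap (fun g => PySem.Dict.getD d g []))) :
    pvMf d gs x ≠ [] := by
  rw [PySem.Set.mem_ofList, List.mem_flatMap] at hx
  obtain ⟨g, hg, hxg⟩ := hx
  intro h
  exact absurd (List.contains_iff_mem.mpr hxg)
    (by simpa using (List.filter_eq_nil_iff.mp h) g hg)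

lemma pv_master_eq (d : PySem.Dict String (List String)) (gs : List String) :
    gs.foldl (fun master g => (PySem.Dict.getD d g []).foldl (fun master s => PySem.Set.add master s) master) PySem.Set.empty
      = PySem.Set.ofList (gs.flatMap (fun g => PySem.Dict.getD d g [])) := by
  rw [PySem.Set.ofList_eq_foldl, List.foldl_flatMap]
  rfl

/-- The loop body of port A, as a standalone function. -/
def pvBodyA (d : PySem.Dict String (List String))
    (st : List (List String) × List Int × PySem.Set String) (c : List String) :
    List (List String) × List Int × PySem.Set String :=
  let inter : PySem.Set String :=
    match c with
    | [] => PySem.Set.empty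
    | x :: rest => rest.foldl (fun acc y => PySem.Set.inter acc (PySem.Dict.getD d y [])) (PySem.Set.ofList (PySem.Dict.getD d x []))
  let cm :=
    st.2.2.foldl (fun cm item =>
      if PySem.Set.contains inter item then (cm.1 + 1, PySem.Set.discard cm.2 item) else cm)
      ((0 : Int), st.2.2)
  (st.1 ++ [c], st.2.1 ++ [cm.1], cm.2)

lemma pv_stepA (d : PySem.Dict String (List String))
    (st : List (List String) × List Int × PySem.Set String) (c : List String) (hc : c ≠ []) :
    pvBodyA d st c
    = (st.1 ++ [c], st.2.1 ++ [((st.2.2.countP (pvPm d c) : Nat) : Int)], st.2.2.filter (fun x => !pvPm d c x)) := by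
  unfold pvBodyA
  cases c with
  | nil => exact absurd rfl hc
  | cons y rest =>
    dsimp only
    rw [show (fun (cm : Int × PySem.Set String) item =>
          if PySem.Set.contains (rest.foldl (fun acc g => PySem.Set.inter acc (PySem.Dict.getD d g [])) (PySem.Set.ofList (PySem.Dict.getD d y []))) item
          then (cm.1 + 1, PySem.Set.discard cm.2 item) else cm)
        = (fun (cm : Int × PySem.Set String) item =>
          if pvPm d (y :: rest) item then (cm.1 + 1, PySem.Set.discard cm.2 item) else cm) from
      funext fun cm => funext fun item => by rw [pv_inter_contains]]
    rw [pv_inner]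
    rw [pv_foldl_discard]
    have hfil : (st.2.2).filter (fun x => !((st.2.2).filter (pvPm d (y :: rest))).contains x)
        = (st.2.2).filter (fun x => !pvPm d (y :: rest) x) := by
      apply List.filter_congr
      intro x hx
      by_cases hp : pvPm d (y :: rest) x = true <;>
        simp [List.mem_filter, hx, hp]
    rw [hfil]
    simp

lemma pv_E_ne_nil {gs : List String} {c : List String}
    (hc : c ∈ (pvDown gs.length).flatMap (fun j => PySem.List.combinations gs j)) : c ≠ [] := by
  obtain ⟨j, hj, hcj⟩ := List.mem_flatMap.mp hc
  obtain ⟨-, hlen⟩ := (PySem.List.mem_combinations_iff gs j c).mp hcj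
  have := (pv_mem_pvDown hj).1
  intro h
  rw [h] at hlen
  simp at hlen
  omega

lemma pv_core (d : PySem.Dict String (List String)) (gs : List String) :
    (let master : PySem.Set String :=
      gs.foldl (fun master g => (PySem.Dict.getD d g []).foldl (fun master s => PySem.Set.add master s) master) PySem.Set.empty
     let st :=
      (PySem.List.pyRange (gs.length : Int) 0 (-1)).foldl (fun st i =>
        (PySem.List.combinations gs i.toNat).foldl (fun st combination =>
          let inter : PySem.Set String :=
            match combination with
            | [] => PySem.Set.empty
            | x :: rest => rest.foldl (fun acc y => PySem.Set.inter acc (PySem.Dict.getD d y [])) (PySem.Set.ofList (PySem.Dict.getD d x []))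
          let cm :=
            st.2.2.foldl (fun cm item =>
              if PySem.Set.contains inter item then (cm.1 + 1, PySem.Set.discard cm.2 item) else cm)
              ((0 : Int), st.2.2)
          (st.1 ++ [combination], st.2.1 ++ [cm.1], cm.2)) st)
        (([] : List (List String)), ([] : List Int), master)
     (st.1, st.2.1))
    = (let master : PySem.Set String := PySem.Set.ofList (gs.flatMap (fun g => PySem.Dict.getD d g []))
       let tally : PySem.Dict (List String) Int :=
        PySem.Dict.counter (master.map (fun s => gs.filter (fun g => (PySem.Dict.getD d g []).contains s)))
       (PySem.List.pyRange (gs.length : Int) 0 (-1)).foldl (fun st i =>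
        (PySem.List.combinations gs i.toNat).foldl (fun st combination =>
          (st.1 ++ [combination], st.2 ++ [PySem.Dict.getD tally combination 0])) st)
        (([] : List (List String)), ([] : List Int))) := by
  dsimp only
  rw [pv_master_eq]
  rw [← List.foldl_flatMap, ← List.foldl_flatMap, pvRange_eq gs.length, List.flatMap_map]
  simp only [Int.toNat_natCast]
  -- A side: rewrite the loop body to its counting form
  rw [PySem.List.foldl_congr_mem _ _
    (fun (st : List (List String) × List Int × PySem.Set String) c =>
      (st.1 ++ [c], st.2.1 ++ [((st.2.2.countP (pvPm d c) : Nat) : Int)], st.2.2.filter (fun x => !pvPm d c x))) _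
    ?hstep]
  case hstep =>
    intro st c hc
    exact pv_stepA d st c (pv_E_ne_nil hc)
  rw [PySem.List.foldl_prod_mk (f := fun (s : List (List String)) (c : List String) => s ++ [c])
      (g := fun (s : List Int × List String) (c : List String) =>
        (s.1 ++ [((s.2.countP (pvPm d c) : Nat) : Int)], s.2.filter (fun x => !pvPm d c x)))]
  rw [PySem.List.foldl_append_singleton_eq_self]
  rw [pv_mainA d gs _ _ _
    (fun x hx => pv_find d gs x (pv_mem_master hx) gs.length
      (by simpa [pvMf] using List.length_filter_le (fun g => (PySem.Dict.getD d g []).contains x) gs))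
    (fun x hx => pv_countE d gs x gs.length
      (by
        have hne := pv_mem_master (gs := gs) hx
        have : 0 < (pvMf d gs x).length := List.length_pos_iff.mpr hne
        omega)
      (by simpa [pvMf] using List.length_filter_le (fun g => (PySem.Dict.getD d g []).contains x) gs))]
  -- B side
  rw [PySem.List.foldl_prod_mk (f := fun (s : List (List String)) (c : List String) => s ++ [c])
      (g := fun (s : List Int) (c : List String) =>
        s ++ [PySem.Dict.getD (PySem.Dict.counter ((PySem.Set.ofList (gs.flatMap (fun g => PySem.Dict.getD d g []))).map (fun s => gs.filter (fun g => (PySem.Dict.getD d g []).contains s)))) c 0])]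
  rw [PySem.List.foldl_append_singleton_eq_self, PySem.List.foldl_append_singleton_eq_map]
  dsimp only
  simp only [List.nil_append]
  congr 1
  apply List.map_congr_left
  intro C hC
  rw [PySem.Dict.getD_counter, List.count_eq_countP, List.countP_map]
  rfl

-- ===== VERDICT (by name: the statement is the Claim_ definition above) =====
theorem mutually_exclusive_set_counts_spec : Claim_equal_mutually_exclusive_set_counts := by
  intro sets groups _ _
  unfold Spec_mutually_exclusive_set_counts
  unfold mutually_exclusive_set_counts mutually_exclusive_set_counts_alt
  cases groups with
  | none => exact pv_core _ _
  | some gs => exact pv_core _ _
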